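-- pv_equiv track=rewrite | github.com/SINHOLEE/Algorithm | python/라인/2.py | fifth
-- ===== SOURCE A (Python) =====
-- def fifth(inp_str):
--     dic = {}
--     for chr in inp_str:
--         if dic.get(chr) is None:
--             dic[chr]=1
--         else:
--             dic[chr]+=1
--     max_value = [value for key, value in dic.items()]
--     return max(max_value)<5
-- ===== SOURCE B (Python) =====
-- def fifth(inp_str):
--     def runs(s):
--         if not s:
--             return []
--         head = s[0]
--         rest = s[1:]
--         k = 0
--         while k < len(rest) and rest[k] == head:
--             k += 1
--         return [k + 1] + runs(rest[k:])
--     return max(runs(sorted(inp_str))) < 5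
-- ===== Notes on version B (the rewrite author's own statement) =====
-- stated objective: alternative
-- what changed: replaces the hash-map character counter with sort-then-run-length-scan: the sorted characters are grouped into maximal runs by a recursive scan and the maximum run length is compared with 5
import Mathlib
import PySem

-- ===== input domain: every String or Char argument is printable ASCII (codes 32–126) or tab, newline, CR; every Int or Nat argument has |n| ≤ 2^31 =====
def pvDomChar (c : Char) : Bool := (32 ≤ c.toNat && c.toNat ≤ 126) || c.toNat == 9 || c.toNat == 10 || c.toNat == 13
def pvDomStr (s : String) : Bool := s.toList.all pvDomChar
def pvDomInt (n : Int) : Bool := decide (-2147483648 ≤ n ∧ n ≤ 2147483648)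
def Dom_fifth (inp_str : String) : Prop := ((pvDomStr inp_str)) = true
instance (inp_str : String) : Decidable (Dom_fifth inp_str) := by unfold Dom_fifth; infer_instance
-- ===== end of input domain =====

-- B replaces A's hash-map counting with sort + run-length scan (alternative decomposition, no speed claim).

-- ===== PORT A =====
def fifth (inp_str : String) : Bool :=
  let dic := inp_str.toList.foldl (fun d c =>
    match d.get? c with
    | none => d.insert c (1 : Int)
    | some v => d.insert c (v + 1)) (PySem.Dict.empty : PySem.Dict Char Int)
  let max_value := dic.items.map (fun kv => kv.2)
  match PySem.List.max? max_value (fun v => v) with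
  | some m => decide (m < 5)
  | none => false   -- max([]) raises ValueError in Python; excluded by Pre_fifth

-- ===== PORT B =====
-- the inner while loop counts the leading elements of `rest` equal to `head`: that is (rest.takeWhile (· == head)).length
def fifthRuns : List Char → List Int
  | [] => []
  | head :: rest =>
    let k := (rest.takeWhile (fun x => x == head)).length
    ((k : Int) + 1) :: fifthRuns (rest.drop k)
termination_by s => s.length
decreasing_by simp

def fifth_alt (inp_str : String) : Bool :=
  match PySem.List.max? (fifthRuns (PySem.List.sorted inp_str.toList (fun c => c) false)) (fun v => v) with
  | some m => decide (m < 5)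
  | none => false   -- max([]) raises ValueError in Python; excluded by Pre_fifth

-- ===== PRECONDITION & SPEC =====
-- Pre_ excludes only the empty string, on which Python's max([]) raises ValueError in both A and B.
def Pre_fifth (inp_str : String) : Prop := inp_str ≠ ""
instance (inp_str : String) : Decidable (Pre_fifth inp_str) := by unfold Pre_fifth; infer_instance
def pvWitness_fifth : String := "hello"

def Spec_fifth (inp_str : String) (out : Bool) : Prop := out = fifth_alt inp_str
instance (inp_str : String) (out : Bool) : Decidable (Spec_fifth inp_str out) := by unfold Spec_fifth; infer_instance

-- ===== CLAIM (what is proved, stated in full; the proofs are below) =====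
def Claim_equal_fifth : Prop := ∀ (inp_str : String), Dom_fifth inp_str → Pre_fifth inp_str → Spec_fifth inp_str (fifth inp_str)

-- ===== LEMMAS AND PROOFS =====

-- A's update function is the standard counting insert
lemma fifth_fold_fun_eq :
    (fun (d : PySem.Dict Char Int) c =>
      match d.get? c with
      | none => d.insert c (1 : Int)
      | some v => d.insert c (v + 1)) =
    (fun d c => d.insert c (d.getD c 0 + 1)) := by
  funext d c
  cases h : d.get? c with
  | none =>
    rw [PySem.Dict.getD_of_get?_eq_none d (0 : Int) h]
    norm_num
  | some v =>
    rw [PySem.Dict.getD_of_get?_eq_some d (0 : Int) h]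

-- "max? … < 5" equals "all elements < 5" on a nonempty list
lemma max_lt5 (l : List Int) (hl : l ≠ []) :
    (match PySem.List.max? l (fun v => v) with
     | some m => decide (m < 5)
     | none => false) = decide (∀ v ∈ l, v < 5) := by
  cases h : PySem.List.max? l (fun v => v) with
  | none => exact absurd ((PySem.List.max?_eq_none_iff l _).mp h) hl
  | some m =>
    simp only [decide_eq_decide]
    constructor
    · intro hm v hv
      exact lt_of_le_of_lt (PySem.List.max?_isMax h v hv) hm
    · intro hall
      exact hall m (PySem.List.max?_mem h)

-- in a sorted list c :: rest, everything after the leading run of c is > c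
lemma gt_of_mem_dropWhile {c : Char} {rest : List Char}
    (hs : (c :: rest).Pairwise (· ≤ ·)) :
    ∀ x ∈ rest.dropWhile (fun y => y == c), c < x := by
  intro x hx
  have hle : ∀ y ∈ rest, c ≤ y := by
    intro y hy; exact (List.pairwise_cons.mp hs).1 y hy
  have hrest : rest.Pairwise (· ≤ ·) := (List.pairwise_cons.mp hs).2
  have hdp : (rest.dropWhile (fun y => y == c)).Pairwise (· ≤ ·) :=
    hrest.sublist (List.dropWhile_sublist _)
  cases hdw : rest.dropWhile (fun y => y == c) with
  | nil => simp [hdw] at hx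
  | cons h' t' =>
    have hh'ne : (h' == c) = false := by
      have := List.head?_dropWhile_not (fun y => y == c) rest
      rw [hdw] at this; exact this
    have hh'mem : h' ∈ rest := (List.dropWhile_sublist _).mem (by rw [hdw]; exact List.mem_cons_self)
    have hch' : c < h' := lt_of_le_of_ne (hle h' hh'mem) (by intro he; rw [he] at hh'ne; simp at hh'ne)
    rw [hdw] at hx
    rcases List.mem_cons.mp hx with rfl | hx'
    · exact hch'
    · exact lt_of_lt_of_le hch' ((List.pairwise_cons.mp (hdw ▸ hdp)).1 x hx')

lemma drop_takeWhile_length {c : Char} (rest : List Char) :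
    rest.drop ((rest.takeWhile (fun x => x == c)).length) = rest.dropWhile (fun x => x == c) := by
  induction rest with
  | nil => simp
  | cons a t ih =>
    by_cases h : (a == c) = true
    · simp [h, ih]
    · simp [h]

-- the head's run length is its total count in the sorted list
lemma count_head_eq {c : Char} {rest : List Char}
    (hs : (c :: rest).Pairwise (· ≤ ·)) :
    (c :: rest).count c = (rest.takeWhile (fun x => x == c)).length + 1 := by
  have hsplit := List.takeWhile_append_dropWhile (p := fun x => x == c) (l := rest)
  have h1 : (rest.takeWhile (fun x => x == c)).count c = (rest.takeWhile (fun x => x == c)).length := by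
    apply List.count_eq_length.mpr
    intro y hy
    have := List.mem_takeWhile_imp hy
    exact (beq_iff_eq.mp this).symm
  have h2 : (rest.dropWhile (fun x => x == c)).count c = 0 := by
    apply List.count_eq_zero.mpr
    intro hmem
    exact absurd rfl (ne_of_gt (gt_of_mem_dropWhile hs c hmem))
  calc (c :: rest).count c = rest.count c + 1 := List.count_cons_self
    _ = (rest.takeWhile (fun x => x == c) ++ rest.dropWhile (fun x => x == c)).count c + 1 := by rw [hsplit]
    _ = _ := by rw [List.count_append, h1, h2]

-- counts of elements surviving the run are unchanged by dropping the head's run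
lemma count_drop_eq {c x : Char} {rest : List Char}
    (hs : (c :: rest).Pairwise (· ≤ ·))
    (hx : x ∈ rest.dropWhile (fun y => y == c)) :
    (rest.dropWhile (fun y => y == c)).count x = (c :: rest).count x := by
  have hxc : c < x := gt_of_mem_dropWhile hs x hx
  have hne : x ≠ c := ne_of_gt hxc
  have h1 : (rest.takeWhile (fun y => y == c)).count x = 0 := by
    apply List.count_eq_zero.mpr
    intro hmem
    have := List.mem_takeWhile_imp hmem
    exact hne (by simpa using this)
  calc (rest.dropWhile (fun y => y == c)).count x
      = (rest.takeWhile (fun y => y == c)).count x + (rest.dropWhile (fun y => y == c)).count x := by rw [h1]; omega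
    _ = (rest.takeWhile (fun y => y == c) ++ rest.dropWhile (fun y => y == c)).count x := (List.count_append ..).symm
    _ = rest.count x := by rw [List.takeWhile_append_dropWhile]
    _ = (c :: rest).count x := (List.count_cons_of_ne (Ne.symm hne)).symm

-- every run length in fifthRuns s is the count of some element of s (s sorted)
lemma mem_fifthRuns {s : List Char} (hs : s.Pairwise (· ≤ ·)) :
    ∀ r ∈ fifthRuns s, ∃ c ∈ s, r = (s.count c : Int) := by
  induction s using fifthRuns.induct with
  | case1 => intro r hr; simp [fifthRuns] at hr
  | case2 c rest k ih =>
    intro r hr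
    rw [fifthRuns] at hr
    rcases List.mem_cons.mp hr with rfl | hr'
    · exact ⟨c, by simp, by rw [count_head_eq hs]; push_cast; ring⟩
    · have hd : rest.drop k = rest.dropWhile (fun x => x == c) := drop_takeWhile_length rest
      have hdp : (rest.drop k).Pairwise (· ≤ ·) := by
        rw [hd]; exact ((List.pairwise_cons.mp hs).2).sublist (List.dropWhile_sublist _)
      obtain ⟨c', hc', rfl⟩ := ih hdp r hr'
      refine ⟨c', ?_, ?_⟩
      · exact List.mem_cons_of_mem _ ((List.dropWhile_sublist _).mem (hd ▸ hc'))
      · rw [hd] at hc' ⊢; rw [count_drop_eq hs hc']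

-- conversely, every element's count appears among the run lengths (s sorted)
lemma count_mem_fifthRuns {s : List Char} (hs : s.Pairwise (· ≤ ·)) :
    ∀ c ∈ s, ((s.count c : Nat) : Int) ∈ fifthRuns s := by
  induction s using fifthRuns.induct with
  | case1 => intro c hc; simp at hc
  | case2 c rest k ih =>
    intro c' hc'
    rw [fifthRuns]
    by_cases hcc : c' = c
    · subst hcc
      apply List.mem_cons.mpr
      left
      rw [count_head_eq hs]; push_cast; ring
    · have hc'rest : c' ∈ rest := by
        rcases List.mem_cons.mp hc' with h | h
        · exact absurd h hcc
        · exact h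
      have hd : rest.drop k = rest.dropWhile (fun x => x == c) := drop_takeWhile_length rest
      have hc'd : c' ∈ rest.drop k := by
        rw [hd]
        rcases (List.mem_append.mp ((List.takeWhile_append_dropWhile (p := fun x => x == c) (l := rest)) ▸ hc'rest)) with h | h
        · exact absurd (by simpa using List.mem_takeWhile_imp h) hcc
        · exact h
      have hdp : (rest.drop k).Pairwise (· ≤ ·) := by
        rw [hd]; exact ((List.pairwise_cons.mp hs).2).sublist (List.dropWhile_sublist _)
      have := ih hdp c' hc'd
      rw [hd] at hc'd this
      rw [count_drop_eq hs hc'd] at this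
      exact List.mem_cons_of_mem _ (by rw [hd]; exact this)

lemma fifthRuns_ne_nil {s : List Char} (hs : s ≠ []) : fifthRuns s ≠ [] := by
  cases s with
  | nil => exact absurd rfl hs
  | cons c rest => rw [fifthRuns]; simp

-- B computes "all character counts < 5"
lemma fifth_alt_eq (inp_str : String) (h : inp_str.toList ≠ []) :
    fifth_alt inp_str = decide (∀ c ∈ inp_str.toList, inp_str.toList.count c < 5) := by
  unfold fifth_alt
  set s := PySem.List.sorted inp_str.toList (fun c => c) false with hsdef
  have hperm : s.Perm inp_str.toList := PySem.List.sorted_perm ..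
  have hs : s.Pairwise (· ≤ ·) := PySem.List.sorted_pairwise ..
  have hsnil : s ≠ [] := by
    intro hnil
    exact h ((PySem.List.sorted_eq_nil_iff _ _ _).mp (hsdef ▸ hnil))
  rw [max_lt5 _ (fifthRuns_ne_nil hsnil), decide_eq_decide]
  constructor
  · intro hall c hc
    have hcs : c ∈ s := hperm.mem_iff.mpr hc
    have := hall _ (count_mem_fifthRuns hs c hcs)
    rw [hperm.count_eq] at this
    exact_mod_cast this
  · intro hall r hr
    obtain ⟨c, hc, rfl⟩ := mem_fifthRuns hs r hr
    rw [hperm.count_eq]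
    exact_mod_cast hall c (hperm.mem_iff.mp hc)

-- A computes "all character counts < 5"
lemma fifth_eq (inp_str : String) (h : inp_str.toList ≠ []) :
    fifth inp_str = decide (∀ c ∈ inp_str.toList, inp_str.toList.count c < 5) := by
  unfold fifth
  simp only [fifth_fold_fun_eq, PySem.Dict.foldl_insert_getD_add_one_eq_counter,
    PySem.Dict.items_counter, List.map_map]
  have hset : PySem.Set.ofList inp_str.toList ≠ [] := by
    intro hnil
    obtain ⟨a, ha⟩ := List.exists_mem_of_ne_nil _ h
    have hmem : a ∈ PySem.Set.ofList inp_str.toList := (PySem.Set.mem_ofList ..).mpr ha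
    rw [hnil] at hmem
    simp at hmem
  rw [max_lt5 _ (by simpa using hset), decide_eq_decide]
  constructor
  · intro hall c hc
    have hcset : c ∈ PySem.Set.ofList inp_str.toList := (PySem.Set.mem_ofList ..).mpr hc
    have := hall _ (List.mem_map.mpr ⟨c, hcset, rfl⟩)
    simp only [Function.comp_apply] at this
    exact_mod_cast this
  · intro hall v hv
    obtain ⟨c, hc, rfl⟩ := List.mem_map.mp hv
    simp only [Function.comp_apply]
    exact_mod_cast hall c ((PySem.Set.mem_ofList ..).mp hc)

-- ===== VERDICT (by name: the statement is the Claim_ definition above) =====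
theorem fifth_spec : Claim_equal_fifth := by
  intro inp_str _ hpre
  unfold Spec_fifth
  have h : inp_str.toList ≠ [] := fun hnil => hpre (String.toList_eq_nil_iff.mp hnil)
  rw [fifth_eq _ h, fifth_alt_eq _ h]
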